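-- pv_equiv track=rewrite | github.com/gongyh/nf-core-scgs | bin/monovar_src/utils.py | get_count_start_and_end
-- ===== SOURCE A (Python) =====
-- def get_count_start_and_end(s):
--     end_counts = s.count('$')
--     ns = s.replace('$', '')
--     start_counts = 0
--     i = 0
--     fs = ''
--     while (i < len(ns)):
--         if ns[i] == '^':
--             i += 2
--             start_counts += 1
--         else:
--             fs = fs + ns[i]
--             i += 1
--     return start_counts, end_counts, fs
-- ===== SOURCE B (Python) =====
-- def get_count_start_and_end(s):
--     # One pass over s with a pending-skip flag instead of two preprocessing
--     # passes plus an index loop with quadratic string concatenation.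
--     start_counts = 0
--     end_counts = 0
--     out = []
--     skip = False
--     for c in s:
--         if c == '$':
--             end_counts += 1
--         elif skip:
--             skip = False
--         elif c == '^':
--             start_counts += 1
--             skip = True
--         else:
--             out.append(c)
--     return start_counts, end_counts, ''.join(out)
-- ===== Notes on version B (the rewrite author's own statement) =====
-- stated objective: faster
-- what changed: Replaced A's two preprocessing passes (dollar count and dollar removal) plus an index-driven while loop with quadratic string concatenation by a single pass over s carrying a pending-skip flag and an output char list joined once.
import Mathlib
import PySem

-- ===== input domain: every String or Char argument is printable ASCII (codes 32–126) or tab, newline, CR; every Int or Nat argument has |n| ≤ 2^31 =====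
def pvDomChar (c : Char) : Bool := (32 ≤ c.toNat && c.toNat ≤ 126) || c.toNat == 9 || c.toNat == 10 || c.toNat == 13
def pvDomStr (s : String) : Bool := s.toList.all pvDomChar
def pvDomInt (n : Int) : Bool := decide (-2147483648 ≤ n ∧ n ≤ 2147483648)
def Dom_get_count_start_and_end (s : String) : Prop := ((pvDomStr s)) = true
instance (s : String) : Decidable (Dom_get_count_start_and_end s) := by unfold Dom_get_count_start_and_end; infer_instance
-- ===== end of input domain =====

-- B replaces A's two preprocessing passes plus an index loop (with quadratic string
-- concatenation) by a single pass over s with a pending-skip flag; proved equal on all inputs.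

-- ===== PORT A =====
-- the while loop of A: index i over ns, '^' consumes two positions, others are appended to fs
def pvLoopA (ns : List Char) (i : Nat) (start_counts : Int) (fs : List Char) : Int × List Char :=
  if h : i < ns.length then
    if ns[i] = '^' then
      pvLoopA ns (i + 2) (start_counts + 1) fs
    else
      pvLoopA ns (i + 1) start_counts (fs ++ [ns[i]])
  else
    (start_counts, fs)
termination_by ns.length - i

def get_count_start_and_end (s : String) : Int × Int × String :=
  let end_counts : Int := (PySem.Str.count s "$" : Int)
  let ns := PySem.Str.replace s "$" ""
  let r := pvLoopA ns.toList 0 0 []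
  (r.1, end_counts, String.ofList r.2)

-- ===== PORT B =====
-- the for loop of B: state (skip flag, counters, output chars)
def pvLoopB (cs : List Char) (skip : Bool) (start_counts end_counts : Int) (out : List Char) :
    Int × Int × List Char :=
  match cs with
  | [] => (start_counts, end_counts, out)
  | c :: rest =>
    if c = '$' then pvLoopB rest skip start_counts (end_counts + 1) out
    else if skip then pvLoopB rest false start_counts end_counts out
    else if c = '^' then pvLoopB rest true (start_counts + 1) end_counts out
    else pvLoopB rest skip start_counts end_counts (out ++ [c])

def get_count_start_and_end_alt (s : String) : Int × Int × String :=
  let r := pvLoopB s.toList false 0 0 []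
  (r.1, r.2.1, String.ofList r.2.2)

-- ===== PRECONDITION & SPEC =====
def Spec_get_count_start_and_end (s : String) (out : Int × Int × String) : Prop := out = get_count_start_and_end_alt s
instance (s : String) (out : Int × Int × String) : Decidable (Spec_get_count_start_and_end s out) := by unfold Spec_get_count_start_and_end; infer_instance

-- ===== CLAIM (what is proved, stated in full; the proofs are below) =====
def Claim_equal_get_count_start_and_end : Prop := ∀ (s : String), Dom_get_count_start_and_end s → Spec_get_count_start_and_end s (get_count_start_and_end s)

-- ===== LEMMAS AND PROOFS =====

-- common reference function: what the scan computes on the '$'-free list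
def pvCore : List Char → Int × List Char
  | [] => (0, [])
  | c :: rest =>
    if c = '^' then ((pvCore rest.tail).1 + 1, (pvCore rest.tail).2)
    else ((pvCore rest).1, c :: (pvCore rest).2)
termination_by l => l.length
decreasing_by
  all_goals (simp [List.length_tail]; try omega)

theorem pvCore_nil : pvCore [] = (0, []) := by rw [pvCore.eq_def]

theorem pvCore_cons (c : Char) (rest : List Char) :
    pvCore (c :: rest) =
      if c = '^' then ((pvCore rest.tail).1 + 1, (pvCore rest.tail).2)
      else ((pvCore rest).1, c :: (pvCore rest).2) := by
  rw [pvCore.eq_def]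

theorem pvLoopA_eq (ns : List Char) (i : Nat) (st : Int) (fs : List Char) :
    pvLoopA ns i st fs = (st + (pvCore (ns.drop i)).1, fs ++ (pvCore (ns.drop i)).2) := by
  fun_induction pvLoopA ns i st fs with
  | case1 i st fs h hc ih =>
    rw [ih, List.drop_eq_getElem_cons h, pvCore_cons, if_pos hc, ← List.tail_drop]
    simp; omega
  | case2 i st fs h hc ih =>
    rw [ih, List.drop_eq_getElem_cons h, pvCore_cons, if_neg hc]
    simp
  | case3 i st fs h =>
    rw [List.drop_eq_nil_of_le (by omega)]
    simp [pvCore_nil]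

theorem pvCount_go_eq (fuel : Nat) (l : List Char) (acc : Nat) (h : l.length ≤ fuel) :
    PySem.Chars.count.go ['$'] fuel l acc = acc + l.count '$' := by
  induction fuel generalizing l acc with
  | zero => cases l with
    | nil => simp [PySem.Chars.count.go]
    | cons c t => simp at h
  | succ n ih =>
    cases l with
    | nil => simp [PySem.Chars.count.go]
    | cons c t =>
      simp only [PySem.Chars.count.go]
      by_cases hc : c = '$'
      · subst hc
        rw [if_pos (by simp [List.isPrefixOf])]
        have hdrop : List.drop (['$'] : List Char).length ('$' :: t) = t := rfl
        rw [hdrop, ih t (acc + 1) (by simpa using Nat.le_of_succ_le_succ h)]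
        simp
        omega
      · rw [if_neg (by simp [List.isPrefixOf]; exact fun hh => hc hh.symm)]
        rw [ih t acc (by simpa using Nat.le_of_succ_le_succ h)]
        simp [hc]

theorem pvReplace_go_eq (fuel : Nat) (l acc : List Char) (h : l.length ≤ fuel) :
    PySem.Chars.replace.go ['$'] [] fuel l acc = acc.reverse ++ l.filter (· ≠ '$') := by
  induction fuel generalizing l acc with
  | zero => cases l with
    | nil => simp [PySem.Chars.replace.go]
    | cons c t => simp at h
  | succ n ih =>
    cases l with
    | nil => simp [PySem.Chars.replace.go]
    | cons c t =>
      simp only [PySem.Chars.replace.go]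
      by_cases hc : c = '$'
      · subst hc
        rw [if_pos (by simp [List.isPrefixOf])]
        have hdrop : List.drop (['$'] : List Char).length ('$' :: t) = t := rfl
        rw [hdrop]
        simp only [List.reverse_nil, List.nil_append]
        rw [ih t acc (by simpa using Nat.le_of_succ_le_succ h)]
        simp
      · rw [if_neg (by simp [List.isPrefixOf]; exact fun hh => hc hh.symm)]
        rw [ih t (c :: acc) (by simpa using Nat.le_of_succ_le_succ h)]
        simp [hc]

theorem pvCount_char (l : List Char) : PySem.Chars.count l ['$'] = l.count '$' := by
  rw [PySem.Chars.count, if_neg (by simp), pvCount_go_eq l.length l 0 le_rfl]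
  simp

theorem pvReplace_char (l : List Char) :
    PySem.Chars.replace l ['$'] [] = l.filter (· ≠ '$') := by
  rw [PySem.Chars.replace, if_neg (by simp), pvReplace_go_eq l.length l [] le_rfl]
  simp

-- B's single pass computes the counters and pvCore of the '$'-free list, skip dropping one pending char
theorem pvLoopB_eq (cs : List Char) (skip : Bool) (st en : Int) (out : List Char) :
    pvLoopB cs skip st en out =
      (st + (pvCore (if skip then (cs.filter (· ≠ '$')).tail else cs.filter (· ≠ '$'))).1,
       en + (cs.count '$' : Int),
       out ++ (pvCore (if skip then (cs.filter (· ≠ '$')).tail else cs.filter (· ≠ '$'))).2) := by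
  induction cs generalizing skip st en out with
  | nil => cases skip <;> simp [pvLoopB, pvCore_nil]
  | cons c rest ih =>
    by_cases hd : c = '$'
    · subst hd
      rw [pvLoopB, if_pos rfl, ih]
      simp
      omega
    · cases skip with
      | true =>
        rw [pvLoopB, if_neg hd, if_pos rfl, ih]
        simp [hd]
      | false =>
        by_cases hc : c = '^'
        · subst hc
          rw [pvLoopB, if_neg hd, if_neg (by simp), if_pos rfl, ih]
          simp [hd, pvCore_cons]
          omega
        · rw [pvLoopB, if_neg hd, if_neg (by simp), if_neg hc, ih]
          simp [hd, hc, pvCore_cons]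

-- ===== VERDICT (by name: the statement is the Claim_ definition above) =====
theorem get_count_start_and_end_spec : Claim_equal_get_count_start_and_end := by
  intro s _
  unfold Spec_get_count_start_and_end get_count_start_and_end get_count_start_and_end_alt
  rw [pvLoopB_eq]
  simp only [Bool.false_eq_true, if_false]
  have hrep : (PySem.Str.replace s "$" "").toList = s.toList.filter (· ≠ '$') := by
    rw [PySem.Str.toList_replace]
    have h1 : ("$" : String).toList = ['$'] := rfl
    have h2 : ("" : String).toList = [] := rfl
    rw [h1, h2, pvReplace_char]
  have hcnt : PySem.Str.count s "$" = s.toList.count '$' := by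
    rw [PySem.Str.count_eq]
    have h1 : ("$" : String).toList = ['$'] := rfl
    rw [h1, pvCount_char]
  rw [pvLoopA_eq, hrep, hcnt]
  simp
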